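-- pv_equiv track=rewrite | github.com/commandblockguy/tipycomp | tipydecomp.py | get_menu_pos
-- ===== SOURCE A (Python) =====
-- def get_menu_pos(data):
--     length = 0
--     index = 4
--     shift = 0
--     while True:
--         byte = data[index]
--         length |= (byte & 0x7f) << shift
--         index += 1
--         shift += 7
--         if byte & 0x80 == 0:
--             break
--
--     start = index + 1
--     end = start + length
--
--     return (start, end)
-- ===== SOURCE B (Python) =====
-- def get_menu_pos(data):
--     # Two phases: first collect the varint bytes, then fold them into the length.
--     varint_bytes = []
--     i = 4
--     while True:
--         b = data[i]
--         varint_bytes.append(b)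
--         i += 1
--         if b & 0x80 == 0:
--             break
--     length = 0
--     for j, b in enumerate(varint_bytes):
--         length |= (b & 0x7f) << (7 * j)
--     start = 4 + len(varint_bytes) + 1
--     return (start, start + length)
-- ===== Notes on version B (the rewrite author's own statement) =====
-- stated objective: alternative
-- what changed: A decodes the varint in one interleaved loop carrying length/index/shift; B first collects the varint bytes (boundary-finding pass), then folds them into the length in a separate enumerate pass and computes the offsets from the byte count.
import Mathlib
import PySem

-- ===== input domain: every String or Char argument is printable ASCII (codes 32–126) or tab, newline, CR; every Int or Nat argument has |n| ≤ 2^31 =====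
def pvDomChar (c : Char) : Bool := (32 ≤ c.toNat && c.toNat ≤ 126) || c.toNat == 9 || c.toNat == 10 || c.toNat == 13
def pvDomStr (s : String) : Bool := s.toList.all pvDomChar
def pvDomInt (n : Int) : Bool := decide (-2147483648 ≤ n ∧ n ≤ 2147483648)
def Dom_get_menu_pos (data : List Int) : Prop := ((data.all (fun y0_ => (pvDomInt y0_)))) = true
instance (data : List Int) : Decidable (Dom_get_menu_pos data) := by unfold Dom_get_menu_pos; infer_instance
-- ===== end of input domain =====

-- B re-decomposes A's single interleaved varint loop into two phases (collect bytes, then fold); return values agree on Pre_.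

-- ===== PORT A =====
-- A's `while True` loop over data[index]; the [] case is Python's IndexError, excluded by Pre_.
-- A's `shift` stays ≥ 0 (starts at 0, only += 7), so it is carried as a Nat; `<<<` is exact for Python's `<<`.
def pvLoopA : List Int → Int → Int → Nat → Int × Int
  | [], _, _, _ => (0, 0)
  | b :: rs, index, length, shift =>
    let length' := PySem.Int.bor length ((PySem.Int.band b 0x7f) <<< shift)
    let index' := index + 1
    if PySem.Int.band b 0x80 == 0 then (index' + 1, index' + 1 + length')
    else pvLoopA rs index' length' (shift + 7)

def get_menu_pos (data : List Int) : Int × Int :=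
  pvLoopA (data.drop 4) 4 0 0

-- ===== PORT B =====
-- phase 1 of Source B: collect the varint bytes starting at offset 4 (the [] case is the IndexError, excluded by Pre_)
def pvTakeVarint : List Int → List Int
  | [] => []
  | b :: rs => if PySem.Int.band b 0x80 == 0 then [b] else b :: pvTakeVarint rs

def get_menu_pos_alt (data : List Int) : Int × Int :=
  let bs := pvTakeVarint (data.drop 4)
  -- phase 2 of Source B: enumerate-fold the collected bytes into the length
  let length := (bs.zipIdx).foldl
    (fun (acc : Int) (p : Int × Nat) => PySem.Int.bor acc ((PySem.Int.band p.1 0x7f) <<< (7 * p.2))) 0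
  let start : Int := 4 + (bs.length : Int) + 1
  (start, start + length)

-- ===== PRECONDITION & SPEC =====
-- Pre_: the varint starting at offset 4 terminates inside the list (some byte from index 4 on has
-- its high bit clear); otherwise Python's data[index] raises IndexError.
def Pre_get_menu_pos (data : List Int) : Prop :=
  (data.drop 4).any (fun b => PySem.Int.band b 0x80 == 0) = true
instance (data : List Int) : Decidable (Pre_get_menu_pos data) := by
  unfold Pre_get_menu_pos; infer_instance

def pvWitness_get_menu_pos : List Int := [1, 2, 3, 4, 130, 5, 9]

def Spec_get_menu_pos (data : List Int) (out : Int × Int) : Prop := out = get_menu_pos_alt data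
instance (data : List Int) (out : Int × Int) : Decidable (Spec_get_menu_pos data out) := by
  unfold Spec_get_menu_pos; infer_instance

-- ===== CLAIM (what is proved, stated in full; the proofs are below) =====
def Claim_equal_get_menu_pos : Prop :=
  ∀ (data : List Int), Dom_get_menu_pos data → Pre_get_menu_pos data →
    Spec_get_menu_pos data (get_menu_pos data)

-- ===== LEMMAS AND PROOFS =====
lemma pvLoopA_eq (rest : List Int) :
    ∀ (index length : Int) (k : Nat),
      rest.any (fun b => PySem.Int.band b 0x80 == 0) = true →
      pvLoopA rest index length (7 * k) =
        (index + ((pvTakeVarint rest).length : Int) + 1,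
         index + ((pvTakeVarint rest).length : Int) + 1 +
           ((pvTakeVarint rest).zipIdx k).foldl
             (fun (acc : Int) (p : Int × Nat) =>
               PySem.Int.bor acc ((PySem.Int.band p.1 0x7f) <<< (7 * p.2))) length) := by
  induction rest with
  | nil => intro _ _ _ h; simp at h
  | cons b rs ih =>
    intro index length k h
    by_cases hb : (PySem.Int.band b 0x80 == 0) = true
    · simp only [pvLoopA, pvTakeVarint, hb, if_pos]
      refine Prod.ext ?_ ?_ <;>
        · simp only [List.zipIdx_cons, List.zipIdx_nil, List.foldl_cons, List.foldl_nil,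
            List.length_cons, List.length_nil]
          push_cast; ring
    · have hrs : rs.any (fun b => PySem.Int.band b 0x80 == 0) = true := by
        simpa [List.any_cons, hb] using h
      have h7 : 7 * k + 7 = 7 * (k + 1) := by ring
      simp only [pvLoopA, pvTakeVarint, hb, Bool.false_eq_true, if_false, h7,
        ih (index + 1) (PySem.Int.bor length ((PySem.Int.band b 0x7f) <<< (7 * k))) (k + 1) hrs]
      refine Prod.ext ?_ ?_ <;>
        · simp only [List.zipIdx_cons, List.foldl_cons, List.length_cons]
          push_cast; ring

-- ===== VERDICT (by name: the statement is the Claim_ definition above) =====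
theorem get_menu_pos_spec : Claim_equal_get_menu_pos := by
  intro data _ hpre
  show get_menu_pos data = get_menu_pos_alt data
  have := pvLoopA_eq (data.drop 4) 4 0 0 hpre
  simpa [get_menu_pos, get_menu_pos_alt] using this
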